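-- pv_equiv track=rewrite | github.com/samuel-kuhn/FileDistinction | FileDistinction.py | string_difference
-- ===== SOURCE A (Python) =====
-- class colors:
--     HEADER = '\033[95m'
--     BLUE = '\033[94m'
--     CYAN = '\033[96m'
--     GREEN = '\033[92m'
--     ORANGE = '\033[93m'
--     RED = '\033[91m'
--     ENDC = '\033[0m'
--     BOLD = '\033[1m'
--     UNDERLINE = '\033[4m'
--
-- def colored(color, text):
--     return(color + text + colors.ENDC)
--
-- def string_difference(str1, str2):
--     if (len(str1) == len(str2)):
--         colored_str1 = ""
--         colored_str2 = ""
--         for i in range(len(str1)):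
--             if (str1[i] == str2[i]):
--                 colored_str1 += str1[i]
--                 colored_str2 += str1[i]
--             else:
--                 colored_str1 += colored(colors.RED, str1[i])
--                 colored_str2 += colored(colors.RED, str2[i])
--         return([colored_str1, colored_str2])
--
--     else:
--         start = end =  ""
--         #start
--         for i in range (min(len(str1), len(str2))):
--             if str1[i] == str2[i]:
--                 start += str1[i]
--             else:
--                 break
--         #end
--         for i in range (min(len(str1), len(str2))):
--             if (str1[::-1][i] == str2[::-1][i]):
--                 end = str1[::-1][i] + end
--             else:
--                 break
--
--         diff1 = str1[len(start):len(str1)-len(end)]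
--         diff2 = str2[len(start):len(str2)-len(end)]
--
--         return([start + colored(colors.RED, diff1) + end, start + colored(colors.RED, diff2) + end])
-- ===== SOURCE B (Python) =====
-- def string_difference(str1, str2):
--     RED = '\033[91m'
--     ENDC = '\033[0m'
--     n1, n2 = len(str1), len(str2)
--     if n1 == n2:
--         # mark-up by segmentation: list the mismatch positions once, then stitch
--         # common slices and colored characters together
--         diffs = [i for i in range(n1) if str1[i] != str2[i]]
--         parts1, parts2 = [], []
--         prev = 0
--         for i in diffs:
--             seg = str1[prev:i]          # common segment (characters equal here)
--             parts1.append(seg)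
--             parts1.append(RED + str1[i] + ENDC)
--             parts2.append(seg)
--             parts2.append(RED + str2[i] + ENDC)
--             prev = i + 1
--         tail = str1[prev:]              # common tail after the last mismatch
--         parts1.append(tail)
--         parts2.append(tail)
--         return ["".join(parts1), "".join(parts2)]
--     else:
--         m = min(n1, n2)
--
--         def max_true(pred, hi):
--             # largest k in [0, hi] with pred(k); pred is downward closed
--             lo = 0
--             while lo < hi:
--                 mid = (lo + hi + 1) // 2
--                 if pred(mid):
--                     lo = mid
--                 else:
--                     hi = mid - 1
--             return lo
--
--         p = max_true(lambda k: str1[:k] == str2[:k], m)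
--         s = max_true(lambda k: str1[n1 - k:] == str2[n2 - k:], m)
--         start = str1[:p]
--         end = str1[n1 - s:]
--         return [start + RED + str1[p:n1 - s] + ENDC + end,
--                 start + RED + str2[p:n2 - s] + ENDC + end]
-- ===== Notes on version B (the rewrite author's own statement) =====
-- stated objective: alternative
-- what changed: Equal-length branch computes the list of mismatch positions once and stitches common slices with colored characters instead of A's per-character accumulate loop; unequal-length branch finds the common prefix/suffix lengths by binary search on slice equality instead of A's linear scans that rebuild str1[::-1]/str2[::-1] on every iteration.
import Mathlib
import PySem

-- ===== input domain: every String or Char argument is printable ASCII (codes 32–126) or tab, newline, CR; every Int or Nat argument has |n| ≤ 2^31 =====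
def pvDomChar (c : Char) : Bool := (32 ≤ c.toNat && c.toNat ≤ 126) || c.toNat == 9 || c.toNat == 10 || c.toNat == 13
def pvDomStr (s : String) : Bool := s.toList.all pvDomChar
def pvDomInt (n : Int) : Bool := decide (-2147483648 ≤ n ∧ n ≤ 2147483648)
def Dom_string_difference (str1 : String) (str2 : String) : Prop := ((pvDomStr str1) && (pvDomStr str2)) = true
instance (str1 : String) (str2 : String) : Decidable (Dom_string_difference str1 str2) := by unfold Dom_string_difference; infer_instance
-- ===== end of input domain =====

-- B replaces A's per-character accumulation loops by a different strategy: the equal-length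
-- branch computes the list of mismatch positions once and stitches common slices together,
-- and the unequal-length branch finds the common prefix/suffix lengths by binary search on
-- slice equality instead of A's linear scans (which re-reverse both strings each iteration);
-- return values are identical on all inputs.

-- ===== PORT A =====
def pvRED : List Char := ['\x1b', '[', '9', '1', 'm']
def pvENDC : List Char := ['\x1b', '[', '0', 'm']
def pvColored (color text : List Char) : List Char := color ++ text ++ pvENDC

-- equal-length branch: for i in range(len(str1)) building the two colored strings
def pvAEqLoop (s1 s2 : List Char) : List Char × List Char :=
  (List.range s1.length).foldl (fun acc i =>
    if s1.getD i ' ' = s2.getD i ' ' then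
      (acc.1 ++ [s1.getD i ' '], acc.2 ++ [s1.getD i ' '])
    else
      (acc.1 ++ pvColored pvRED [s1.getD i ' '], acc.2 ++ pvColored pvRED [s2.getD i ' '])) ([], [])

-- "for i in range(min): if str1[i]==str2[i]: start+=str1[i] else: break" (fuel = remaining iterations)
def pvAStartLoop (s1 s2 : List Char) (i fuel : Nat) (acc : List Char) : List Char :=
  match fuel with
  | 0 => acc
  | f + 1 =>
    if s1.getD i ' ' = s2.getD i ' ' then pvAStartLoop s1 s2 (i + 1) f (acc ++ [s1.getD i ' '])
    else acc

-- "for i in range(min): if str1[::-1][i]==str2[::-1][i]: end = str1[::-1][i] + end else: break"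
-- (str1[::-1] recomputed each iteration, exactly as A does)
def pvAEndLoop (s1 s2 : List Char) (i fuel : Nat) (e : List Char) : List Char :=
  match fuel with
  | 0 => e
  | f + 1 =>
    let r1 := (PySem.List.slice? s1 none none (-1)).getD []
    let r2 := (PySem.List.slice? s2 none none (-1)).getD []
    if r1.getD i ' ' = r2.getD i ' ' then pvAEndLoop s1 s2 (i + 1) f (r1.getD i ' ' :: e)
    else e

def string_difference (str1 : String) (str2 : String) : List String :=
  let s1 := str1.toList
  let s2 := str2.toList
  if s1.length = s2.length then
    let r := pvAEqLoop s1 s2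
    [String.ofList r.1, String.ofList r.2]
  else
    let m := min s1.length s2.length
    let start := pvAStartLoop s1 s2 0 m []
    let e := pvAEndLoop s1 s2 0 m []
    let diff1 := PySem.List.slice s1 (some (start.length : Int)) (some ((s1.length : Int) - (e.length : Int)))
    let diff2 := PySem.List.slice s2 (some (start.length : Int)) (some ((s2.length : Int) - (e.length : Int)))
    [String.ofList (start ++ pvColored pvRED diff1 ++ e), String.ofList (start ++ pvColored pvRED diff2 ++ e)]

-- ===== PORT B =====
-- "for i in diffs: parts1.append(str1[prev:i]); parts1.append(RED+str1[i]+ENDC); …; prev = i+1"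
def pvBSegStep (s1 s2 : List Char) (st : Nat × List (List Char) × List (List Char)) (i : Nat) :
    Nat × List (List Char) × List (List Char) :=
  (i + 1,
   st.2.1 ++ [PySem.List.slice s1 (some (st.1 : Int)) (some (i : Int)), pvRED ++ [s1.getD i ' '] ++ pvENDC],
   st.2.2 ++ [PySem.List.slice s1 (some (st.1 : Int)) (some (i : Int)), pvRED ++ [s2.getD i ' '] ++ pvENDC])

def pvBSegLoop (s1 s2 : List Char) (ds : List Nat) : Nat × List (List Char) × List (List Char) :=
  ds.foldl (pvBSegStep s1 s2) (0, [], [])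

-- "def max_true(pred, hi): lo = 0; while lo < hi: mid = (lo+hi+1)//2; if pred(mid): lo = mid else: hi = mid-1; return lo"
def pvBSearch (pred : Nat → Bool) (fuel lo hi : Nat) : Nat :=
  match fuel with
  | 0 => lo
  | f + 1 =>
    if lo < hi then
      if pred ((lo + hi + 1) / 2) then pvBSearch pred f ((lo + hi + 1) / 2) hi
      else pvBSearch pred f lo ((lo + hi + 1) / 2 - 1)
    else lo

def string_difference_alt (str1 : String) (str2 : String) : List String :=
  let s1 := str1.toList
  let s2 := str2.toList
  let n1 := s1.length
  let n2 := s2.length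
  if n1 = n2 then
    let ds := (List.range n1).filter (fun i => !(s1.getD i ' ' == s2.getD i ' '))
    let st := pvBSegLoop s1 s2 ds
    let tail := PySem.List.slice s1 (some (st.1 : Int)) none
    [String.ofList (PySem.Chars.join [] (st.2.1 ++ [tail])),
     String.ofList (PySem.Chars.join [] (st.2.2 ++ [tail]))]
  else
    let m := min n1 n2
    let p := pvBSearch (fun k => PySem.List.slice s1 none (some (k : Int)) == PySem.List.slice s2 none (some (k : Int))) m 0 m
    let s := pvBSearch (fun k => PySem.List.slice s1 (some ((n1 - k : Nat) : Int)) none == PySem.List.slice s2 (some ((n2 - k : Nat) : Int)) none) m 0 m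
    let start := PySem.List.slice s1 none (some (p : Int))
    let e := PySem.List.slice s1 (some ((n1 - s : Nat) : Int)) none
    [String.ofList (start ++ pvRED ++ PySem.List.slice s1 (some (p : Int)) (some ((n1 - s : Nat) : Int)) ++ pvENDC ++ e),
     String.ofList (start ++ pvRED ++ PySem.List.slice s2 (some (p : Int)) (some ((n2 - s : Nat) : Int)) ++ pvENDC ++ e)]

-- ===== PRECONDITION & SPEC =====
def Spec_string_difference (str1 : String) (str2 : String) (out : List String) : Prop := out = string_difference_alt str1 str2
instance (str1 : String) (str2 : String) (out : List String) : Decidable (Spec_string_difference str1 str2 out) := by unfold Spec_string_difference; infer_instance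

-- ===== CLAIM (what is proved, stated in full; the proofs are below) =====
def Claim_equal_string_difference : Prop := ∀ (str1 : String) (str2 : String), Dom_string_difference str1 str2 → Spec_string_difference str1 str2 (string_difference str1 str2)

-- ===== LEMMAS AND PROOFS =====

-- piece produced per character pair (common normal form for both equal-length branches)
def pvPiece1 (pc : Char × Char) : List Char :=
  if pc.1 = pc.2 then [pc.1] else pvRED ++ [pc.1] ++ pvENDC
def pvPiece2 (pc : Char × Char) : List Char :=
  if pc.1 = pc.2 then [pc.1] else pvRED ++ [pc.2] ++ pvENDC

theorem pvJoinNilFlatten (parts : List (List Char)) : PySem.Chars.join [] parts = parts.flatten := by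
  induction parts with
  | nil => rfl
  | cons h t ih =>
    cases t with
    | nil => simp [PySem.Chars.join, List.intercalate]
    | cons h2 t2 => rw [PySem.Chars.join_cons_cons, ih]; simp

theorem pvAEqLoop_eq (s1 s2 : List Char) :
    pvAEqLoop s1 s2 =
      ((List.range s1.length).flatMap (fun i => pvPiece1 (s1.getD i ' ', s2.getD i ' ')),
       (List.range s1.length).flatMap (fun i => pvPiece2 (s1.getD i ' ', s2.getD i ' '))) := by
  have step1 : pvAEqLoop s1 s2 = (List.range s1.length).foldl
      (fun (acc : List Char × List Char) i =>
        (acc.1 ++ pvPiece1 (s1.getD i ' ', s2.getD i ' '),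
         acc.2 ++ pvPiece2 (s1.getD i ' ', s2.getD i ' '))) ([], []) := by
    unfold pvAEqLoop
    apply PySem.List.foldl_congr_mem
    intro acc i _
    simp only [pvPiece1, pvPiece2, pvColored]
    split_ifs <;> simp
  rw [step1,
      PySem.List.foldl_prod_mk
        (f := fun acc i => acc ++ pvPiece1 (s1.getD i ' ', s2.getD i ' '))
        (g := fun acc i => acc ++ pvPiece2 (s1.getD i ' ', s2.getD i ' ')),
      PySem.List.foldl_append_eq_flatMap, PySem.List.foldl_append_eq_flatMap]
  simp

-- ---------- the linear prefix scan used as the common specification of both programs ----------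
def pvBPrefLoop (s1 s2 : List Char) (m p fuel : Nat) : Nat :=
  match fuel with
  | 0 => p
  | f + 1 =>
    if p < m ∧ s1.getD p ' ' = s2.getD p ' ' then pvBPrefLoop s1 s2 m (p + 1) f else p

theorem pvPrefLoop_ge (s1 s2 : List Char) :
    ∀ fuel m p, p ≤ pvBPrefLoop s1 s2 m p fuel := by
  intro fuel
  induction fuel with
  | zero => intro m p; simp [pvBPrefLoop]
  | succ f ih =>
    intro m p
    rw [pvBPrefLoop]
    split
    · exact le_trans (Nat.le_succ p) (ih m (p + 1))
    · exact le_refl p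

theorem pvPrefLoop_le (s1 s2 : List Char) :
    ∀ fuel m p, p ≤ m → pvBPrefLoop s1 s2 m p fuel ≤ m := by
  intro fuel
  induction fuel with
  | zero => intro m p h; simpa [pvBPrefLoop] using h
  | succ f ih =>
    intro m p h
    rw [pvBPrefLoop]
    split
    · next hcond => exact ih m (p + 1) hcond.1
    · exact h

theorem pvPrefLoop_spec (s1 s2 : List Char) (m : Nat) :
    ∀ fuel i, m ≤ i + fuel →
      (∀ j, i ≤ j → j < pvBPrefLoop s1 s2 m i fuel → s1.getD j ' ' = s2.getD j ' ') ∧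
      (pvBPrefLoop s1 s2 m i fuel < m →
        s1.getD (pvBPrefLoop s1 s2 m i fuel) ' ' ≠ s2.getD (pvBPrefLoop s1 s2 m i fuel) ' ') := by
  intro fuel
  induction fuel with
  | zero =>
    intro i hm
    constructor
    · intro j hj1 hj2; simp [pvBPrefLoop] at hj2; omega
    · intro h; simp [pvBPrefLoop] at h; omega
  | succ f ih =>
    intro i hm
    by_cases hc : i < m ∧ s1.getD i ' ' = s2.getD i ' '
    · have hA : pvBPrefLoop s1 s2 m i (f + 1) = pvBPrefLoop s1 s2 m (i + 1) f := by
        rw [pvBPrefLoop, if_pos hc]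
      rw [hA]
      obtain ⟨ih1, ih2⟩ := ih (i + 1) (by omega)
      refine ⟨?_, ih2⟩
      intro j hj1 hj2
      by_cases hji : j = i
      · subst hji; exact hc.2
      · exact ih1 j (by omega) hj2
    · have hA : pvBPrefLoop s1 s2 m i (f + 1) = i := by
        rw [pvBPrefLoop, if_neg hc]
      rw [hA]
      constructor
      · intro j hj1 hj2; omega
      · intro hi heq
        exact hc ⟨hi, heq⟩

-- ---------- A's unequal-length loops compute exactly the linear scans ----------
theorem pvAStartLoop_eq (s1 s2 : List Char) :
    ∀ fuel i acc, i + fuel ≤ s1.length → i + fuel ≤ s2.length →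
      pvAStartLoop s1 s2 i fuel acc =
        acc ++ (s1.drop i).take (pvBPrefLoop s1 s2 (i + fuel) i fuel - i) := by
  intro fuel
  induction fuel with
  | zero => intro i acc _ _; simp [pvAStartLoop, pvBPrefLoop]
  | succ f ih =>
    intro i acc h1 h2
    by_cases hc : s1.getD i ' ' = s2.getD i ' '
    · have hA : pvAStartLoop s1 s2 i (f + 1) acc
          = pvAStartLoop s1 s2 (i + 1) f (acc ++ [s1.getD i ' ']) := by
        rw [pvAStartLoop, if_pos hc]
      have hB : pvBPrefLoop s1 s2 (i + (f + 1)) i (f + 1)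
          = pvBPrefLoop s1 s2 (i + (f + 1)) (i + 1) f := by
        rw [pvBPrefLoop, if_pos ⟨by omega, hc⟩]
      have hmm : i + (f + 1) = (i + 1) + f := by omega
      rw [hA, ih (i + 1) _ (by omega) (by omega), hB, hmm]
      have hi1 : i < s1.length := by omega
      have hge : i + 1 ≤ pvBPrefLoop s1 s2 ((i + 1) + f) (i + 1) f := pvPrefLoop_ge s1 s2 f _ _
      rw [List.getD_eq_getElem _ _ hi1, List.drop_eq_getElem_cons hi1]
      have hsub : pvBPrefLoop s1 s2 ((i + 1) + f) (i + 1) f - i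
          = (pvBPrefLoop s1 s2 ((i + 1) + f) (i + 1) f - (i + 1)) + 1 := by omega
      rw [hsub, List.take_succ_cons]
      simp
    · rw [pvAStartLoop, if_neg hc, pvBPrefLoop,
          if_neg (by intro hh; exact hc hh.2)]
      simp

theorem pvAEndLoop_eq (s1 s2 : List Char) :
    ∀ fuel i e, i + fuel ≤ s1.length → i + fuel ≤ s2.length →
      pvAEndLoop s1 s2 i fuel e =
        ((s1.reverse.drop i).take
          (pvBPrefLoop s1.reverse s2.reverse (i + fuel) i fuel - i)).reverse ++ e := by
  intro fuel
  induction fuel with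
  | zero => intro i e _ _; simp [pvAEndLoop, pvBPrefLoop]
  | succ f ih =>
    intro i e h1 h2
    have hr1 : (PySem.List.slice? s1 none none (-1)).getD [] = s1.reverse := by
      rw [PySem.List.slice?_none_none_neg_one]; rfl
    have hr2 : (PySem.List.slice? s2 none none (-1)).getD [] = s2.reverse := by
      rw [PySem.List.slice?_none_none_neg_one]; rfl
    by_cases hc : s1.reverse.getD i ' ' = s2.reverse.getD i ' '
    · have hA : pvAEndLoop s1 s2 i (f + 1) e
          = pvAEndLoop s1 s2 (i + 1) f (s1.reverse.getD i ' ' :: e) := by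
        rw [pvAEndLoop]
        simp only [hr1, hr2]
        rw [if_pos hc]
      have hB : pvBPrefLoop s1.reverse s2.reverse (i + (f + 1)) i (f + 1)
          = pvBPrefLoop s1.reverse s2.reverse (i + (f + 1)) (i + 1) f := by
        rw [pvBPrefLoop, if_pos ⟨by omega, hc⟩]
      have hmm : i + (f + 1) = (i + 1) + f := by omega
      rw [hA, ih (i + 1) _ (by omega) (by omega), hB, hmm]
      have hi1 : i < s1.reverse.length := by simpa using (by omega : i < s1.length)
      have hge : i + 1 ≤ pvBPrefLoop s1.reverse s2.reverse ((i + 1) + f) (i + 1) f :=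
        pvPrefLoop_ge _ _ f _ _
      rw [List.getD_eq_getElem _ _ hi1, List.drop_eq_getElem_cons hi1]
      have hsub : pvBPrefLoop s1.reverse s2.reverse ((i + 1) + f) (i + 1) f - i
          = (pvBPrefLoop s1.reverse s2.reverse ((i + 1) + f) (i + 1) f - (i + 1)) + 1 := by omega
      rw [hsub, List.take_succ_cons]
      simp
    · rw [pvAEndLoop]
      simp only [hr1, hr2]
      rw [if_neg hc, pvBPrefLoop, if_neg (by intro hh; exact hc hh.2)]
      simp

-- ---------- B's binary search returns the threshold of a downward-closed predicate ----------
theorem pvBSearch_threshold (P : Nat → Bool) (p : Nat) :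
    ∀ fuel lo hi, hi - lo ≤ fuel → lo ≤ p → p ≤ hi →
      (∀ k, lo ≤ k → k ≤ hi → (P k = true ↔ k ≤ p)) → pvBSearch P fuel lo hi = p := by
  intro fuel
  induction fuel with
  | zero =>
    intro lo hi hd h1 h2 _
    simp only [pvBSearch]
    omega
  | succ f ih =>
    intro lo hi hd h1 h2 hthr
    by_cases hlh : lo < hi
    · rw [pvBSearch, if_pos hlh]
      have hmid1 : lo < (lo + hi + 1) / 2 := by omega
      have hmid2 : (lo + hi + 1) / 2 ≤ hi := by omega
      by_cases hP : P ((lo + hi + 1) / 2) = true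
      · rw [if_pos hP]
        have hple : (lo + hi + 1) / 2 ≤ p := (hthr _ (by omega) hmid2).mp hP
        exact ih _ hi (by omega) hple h2 (fun k hk1 hk2 => hthr k (by omega) hk2)
      · rw [if_neg hP]
        have hpgt : ¬ ((lo + hi + 1) / 2 ≤ p) := fun hle => hP ((hthr _ (by omega) hmid2).mpr hle)
        exact ih lo _ (by omega) h1 (by omega) (fun k hk1 hk2 => hthr k hk1 (by omega))
    · rw [pvBSearch, if_neg hlh]
      omega

theorem pvTakeEqIff (s1 s2 : List Char) (k : Nat) (hk1 : k ≤ s1.length) (hk2 : k ≤ s2.length) :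
    s1.take k = s2.take k ↔ ∀ j, j < k → s1.getD j ' ' = s2.getD j ' ' := by
  constructor
  · intro h j hj
    have h1 : j < s1.length := by omega
    have h2 : j < s2.length := by omega
    rw [List.getD_eq_getElem _ _ h1, List.getD_eq_getElem _ _ h2]
    have := congrArg (fun l => l.getD j ' ') h
    simpa [List.getD_eq_getElem, List.getElem_take, hj, h1, h2] using this
  · intro h
    apply List.ext_getElem
    · simp; omega
    · intro j hj1 hj2
      have hjk : j < k := by simp at hj1; omega
      have h1 : j < s1.length := by omega
      have h2 : j < s2.length := by omega
      have := h j hjk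
      rw [List.getD_eq_getElem _ _ h1, List.getD_eq_getElem _ _ h2] at this
      simpa [List.getElem_take] using this

theorem pvDropEqRevTake (l : List Char) (k : Nat) :
    l.drop (l.length - k) = (l.reverse.take k).reverse := by
  rw [List.take_reverse]
  simp

-- the binary-search predicate "take k equal" has threshold exactly pvBPrefLoop … 0 m
theorem pvSearchPref_eq (s1 s2 : List Char) (m : Nat) (hm1 : m ≤ s1.length) (hm2 : m ≤ s2.length) :
    ∀ k, k ≤ m → (s1.take k = s2.take k ↔ k ≤ pvBPrefLoop s1 s2 m 0 m) := by
  intro k hk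
  obtain ⟨hall, hmis⟩ := pvPrefLoop_spec s1 s2 m m 0 (by omega)
  have hple : pvBPrefLoop s1 s2 m 0 m ≤ m := pvPrefLoop_le s1 s2 m m 0 (by omega)
  rw [pvTakeEqIff s1 s2 k (by omega) (by omega)]
  constructor
  · intro h
    by_contra hgt
    exact hmis (by omega) (h _ (by omega))
  · intro h j hj
    exact hall j (by omega) (by omega)

-- ---------- no-mismatch segments flatten to plain slices ----------
theorem pvNoDiffSeg (s1 s2 : List Char) (f : Char × Char → List Char)
    (hf : ∀ c : Char, f (c, c) = [c]) :
    ∀ cnt a, a + cnt ≤ s1.length →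
      (∀ j, a ≤ j → j < a + cnt → s1.getD j ' ' = s2.getD j ' ') →
      (List.range' a cnt).flatMap (fun i => f (s1.getD i ' ', s2.getD i ' ')) = (s1.drop a).take cnt := by
  intro cnt
  induction cnt with
  | zero => intro a _ _; simp
  | succ c ih =>
    intro a hlen hall
    have ha : a < s1.length := by omega
    rw [List.range'_succ, List.flatMap_cons, ih (a + 1) (by omega) (fun j h1 h2 => hall j (by omega) (by omega))]
    have heq : s2.getD a ' ' = s1.getD a ' ' := (hall a (by omega) (by omega)).symm
    rw [heq, hf]
    rw [List.getD_eq_getElem _ _ ha, List.drop_eq_getElem_cons ha, List.take_succ_cons]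
    simp

theorem pvFilterRange'_cons (p : Nat → Bool) :
    ∀ cnt prev i rest, (List.range' prev cnt).filter p = i :: rest →
      prev ≤ i ∧ i < prev + cnt ∧ p i = true ∧
      (∀ j, prev ≤ j → j < i → p j = false) ∧
      rest = (List.range' (i + 1) (prev + cnt - (i + 1))).filter p := by
  intro cnt
  induction cnt with
  | zero => intro prev i rest h; simp at h
  | succ c ih =>
    intro prev i rest h
    rw [List.range'_succ, List.filter_cons] at h
    by_cases hp : p prev = true
    · rw [if_pos hp] at h
      obtain ⟨h1, h2⟩ := List.cons_eq_cons.mp h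
      subst h1
      refine ⟨le_refl _, by omega, hp, fun j hj1 hj2 => by omega, ?_⟩
      rw [← h2]
      congr 1
      congr 1
      omega
    · rw [if_neg hp] at h
      obtain ⟨g1, g2, g3, g4, g5⟩ := ih (prev + 1) i rest h
      refine ⟨by omega, by omega, g3, ?_, ?_⟩
      · intro j hj1 hj2
        by_cases hjp : j = prev
        · subst hjp; exact eq_false_of_ne_true hp
        · exact g4 j (by omega) hj2
      · rw [g5]
        congr 2
        omega

-- ---------- the segmentation loop produces exactly the per-index pieces ----------
theorem pvSegLoop_spec (s1 s2 : List Char) :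
    ∀ cnt prev acc1 acc2 st, prev + cnt = s1.length →
      st = ((List.range' prev cnt).filter
              (fun i => !(s1.getD i ' ' == s2.getD i ' '))).foldl (pvBSegStep s1 s2) (prev, acc1, acc2) →
      st.2.1.flatten ++ s1.drop st.1
          = acc1.flatten ++ (List.range' prev cnt).flatMap (fun i => pvPiece1 (s1.getD i ' ', s2.getD i ' '))
      ∧ st.2.2.flatten ++ s1.drop st.1
          = acc2.flatten ++ (List.range' prev cnt).flatMap (fun i => pvPiece2 (s1.getD i ' ', s2.getD i ' ')) := by
  intro cnt
  induction cnt using Nat.strong_induction_on with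
  | _ cnt IH =>
    intro prev acc1 acc2 st hpc hst
    cases hfil : (List.range' prev cnt).filter (fun i => !(s1.getD i ' ' == s2.getD i ' ')) with
    | nil =>
      rw [hfil] at hst
      simp only [List.foldl_nil] at hst
      subst hst
      have hall : ∀ j, prev ≤ j → j < prev + cnt → s1.getD j ' ' = s2.getD j ' ' := by
        intro j hj1 hj2
        have hmem : j ∈ List.range' prev cnt := by
          rw [List.mem_range'_1]; omega
        have := List.filter_eq_nil_iff.mp hfil j hmem
        simpa using this
      constructor
      · rw [pvNoDiffSeg s1 s2 pvPiece1 (fun c => by simp [pvPiece1]) cnt prev (by omega) hall]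
        simp
        omega
      · rw [pvNoDiffSeg s1 s2 pvPiece2 (fun c => by simp [pvPiece2]) cnt prev (by omega) hall]
        simp
        omega
    | cons i rest =>
      obtain ⟨g1, g2, g3, g4, g5⟩ := pvFilterRange'_cons _ cnt prev i rest hfil
      have hdiff : s1.getD i ' ' ≠ s2.getD i ' ' := by
        simpa using g3
      have hallpre : ∀ j, prev ≤ j → j < i → s1.getD j ' ' = s2.getD j ' ' := by
        intro j hj1 hj2
        have := g4 j hj1 hj2
        simpa using this
      rw [hfil] at hst
      simp only [List.foldl_cons] at hst
      have hstep : pvBSegStep s1 s2 (prev, acc1, acc2) i =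
          (i + 1,
           acc1 ++ [PySem.List.slice s1 (some (prev : Int)) (some (i : Int)), pvRED ++ [s1.getD i ' '] ++ pvENDC],
           acc2 ++ [PySem.List.slice s1 (some (prev : Int)) (some (i : Int)), pvRED ++ [s2.getD i ' '] ++ pvENDC]) := rfl
      rw [hstep] at hst
      have hcnt' : prev + cnt - (i + 1) < cnt := by omega
      obtain ⟨e1, e2⟩ := IH (prev + cnt - (i + 1)) hcnt' (i + 1) _ _ st (by omega) (by rw [hst, g5])
      -- split the range at i
      have hsplit : List.range' prev cnt
          = List.range' prev (i - prev) ++ i :: List.range' (i + 1) (prev + cnt - (i + 1)) := by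
        have h1 : List.range' prev (i - prev) ++ List.range' (prev + (i - prev)) ((prev + cnt - (i + 1)) + 1)
            = List.range' prev ((i - prev) + ((prev + cnt - (i + 1)) + 1)) := List.range'_append_1
        rw [show (i - prev) + ((prev + cnt - (i + 1)) + 1) = cnt by omega,
            show prev + (i - prev) = i by omega, List.range'_succ] at h1
        exact h1.symm
      have hseg : PySem.List.slice s1 (some (prev : Int)) (some (i : Int)) = (s1.drop prev).take (i - prev) :=
        PySem.List.slice_natCast s1 prev i
      have hseg1 : (List.range' prev (i - prev)).flatMap (fun j => pvPiece1 (s1.getD j ' ', s2.getD j ' '))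
          = (s1.drop prev).take (i - prev) :=
        pvNoDiffSeg s1 s2 pvPiece1 (fun c => by simp [pvPiece1]) (i - prev) prev (by omega)
          (fun j h1 h2 => hallpre j h1 (by omega))
      have hseg2 : (List.range' prev (i - prev)).flatMap (fun j => pvPiece2 (s1.getD j ' ', s2.getD j ' '))
          = (s1.drop prev).take (i - prev) :=
        pvNoDiffSeg s1 s2 pvPiece2 (fun c => by simp [pvPiece2]) (i - prev) prev (by omega)
          (fun j h1 h2 => hallpre j h1 (by omega))
      constructor
      · rw [e1, hsplit]
        simp only [List.flatMap_append, List.flatMap_cons, List.flatten_append, List.flatten_cons,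
                   List.flatten_nil, List.append_nil, hseg]
        rw [hseg1]
        simp only [pvPiece1]
        rw [if_neg hdiff]
        simp
      · rw [e2, hsplit]
        simp only [List.flatMap_append, List.flatMap_cons, List.flatten_append, List.flatten_cons,
                   List.flatten_nil, List.append_nil, hseg]
        rw [hseg2]
        simp only [pvPiece2]
        rw [if_neg hdiff]
        simp

-- ===== VERDICT (by name: the statement is the Claim_ definition above) =====
theorem string_difference_spec : Claim_equal_string_difference := by
  intro str1 str2 _
  unfold Spec_string_difference string_difference string_difference_alt
  set s1 := str1.toList with hs1
  set s2 := str2.toList with hs2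
  by_cases hlen : s1.length = s2.length
  · simp only [if_pos hlen]
    set ds := (List.range s1.length).filter (fun i => !(s1.getD i ' ' == s2.getD i ' ')) with hds
    set st := pvBSegLoop s1 s2 ds with hstdef
    obtain ⟨e1, e2⟩ := pvSegLoop_spec s1 s2 s1.length 0 [] [] st (by omega)
      (by rw [hstdef, pvBSegLoop, hds, List.range_eq_range'])
    rw [pvAEqLoop_eq]
    have htail : PySem.List.slice s1 (some (st.1 : Int)) none = s1.drop st.1 :=
      PySem.List.slice_from_natCast s1 st.1
    simp only [htail, pvJoinNilFlatten]
    simp only [List.flatten_append, List.flatten_cons, List.flatten_nil, List.append_nil]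
    rw [e1, e2]
    simp [List.range_eq_range']
  · simp only [if_neg hlen]
    set m := min s1.length s2.length with hm
    have hm1 : m ≤ s1.length := Nat.min_le_left _ _
    have hm2 : m ≤ s2.length := Nat.min_le_right _ _
    set p := pvBPrefLoop s1 s2 m 0 m with hp
    set q := pvBPrefLoop s1.reverse s2.reverse m 0 m with hq
    have hp_le : p ≤ m := pvPrefLoop_le s1 s2 m m 0 (Nat.zero_le m)
    have hq_le : q ≤ m := pvPrefLoop_le _ _ m m 0 (Nat.zero_le m)
    -- A's loops
    have hstart : pvAStartLoop s1 s2 0 m [] = s1.take p := by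
      rw [pvAStartLoop_eq s1 s2 m 0 [] (by omega) (by omega)]
      simp [hp]
    have hend : pvAEndLoop s1 s2 0 m [] = s1.drop (s1.length - q) := by
      rw [pvAEndLoop_eq s1 s2 m 0 [] (by omega) (by omega)]
      simp only [Nat.zero_add, List.drop_zero, Nat.sub_zero, List.append_nil, ← hq]
      rw [List.take_reverse]
      simp
    -- B's binary searches
    have hbsp : pvBSearch (fun k => PySem.List.slice s1 none (some (k : Int)) == PySem.List.slice s2 none (some (k : Int))) m 0 m = p := by
      apply pvBSearch_threshold _ p m 0 m (by omega) (by omega) hp_le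
      intro k _hk1 hk2
      simp only [PySem.List.slice_to_natCast, beq_iff_eq]
      exact pvSearchPref_eq s1 s2 m hm1 hm2 k hk2
    have hbsq : pvBSearch (fun k => PySem.List.slice s1 (some ((s1.length - k : Nat) : Int)) none == PySem.List.slice s2 (some ((s2.length - k : Nat) : Int)) none) m 0 m = q := by
      apply pvBSearch_threshold _ q m 0 m (by omega) (by omega) hq_le
      intro k _hk1 hk2
      simp only [PySem.List.slice_from_natCast, beq_iff_eq]
      rw [pvDropEqRevTake s1 k, pvDropEqRevTake s2 k, List.reverse_inj]
      exact pvSearchPref_eq s1.reverse s2.reverse m (by simp; omega) (by simp; omega) k hk2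
    rw [hstart, hend, hbsp, hbsq]
    have hlstart : (s1.take p).length = p := by simp; omega
    have hlend : (s1.drop (s1.length - q)).length = q := by simp; omega
    have hcast1 : (s1.length : Int) - (q : Int) = ((s1.length - q : Nat) : Int) := by omega
    have hcast2 : (s2.length : Int) - (q : Int) = ((s2.length - q : Nat) : Int) := by omega
    have hbstart : PySem.List.slice s1 none (some (p : Int)) = s1.take p := by simp [pysem]
    have hbend : PySem.List.slice s1 (some ((s1.length - q : Nat) : Int)) none
        = s1.drop (s1.length - q) := by simp [pysem]
    rw [hbstart, hbend, hlstart, hlend, hcast1, hcast2]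
    simp [pvColored]
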